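-- pv_equiv track=rewrite | github.com/oeyh98/algorithm | 프로그래머스/1/67256. ［카카오 인턴］ 키패드 누르기/［카카오 인턴］ 키패드 누르기.py | solution
-- ===== SOURCE A (Python) =====
-- from collections import deque
--
-- def solution(numbers, hand):
--     answer = ""
--     dial = [[1, 2, 3], [4, 5, 6], [7, 8, 9], ['*', 0, '#']]
--     dial_map = {
--         1: (0, 0), 2: (0, 1), 3: (0, 2),
--         4: (1, 0), 5: (1, 1), 6: (1, 2),
--         7: (2, 0), 8: (2, 1), 9: (2, 2),
--         0: (3, 1), '*': (3, 0), '#': (3, 2)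
--     }
--
--     left = dial_map['*']
--     right = dial_map['#']
--
--
--     def bfs(start, target):
--         queue = deque([start])
--         visited = set()
--         visited.add(start)
--         distance = 0
--
--         while queue:
--             for _ in range(len(queue)):
--                 x, y = queue.popleft()
--                 if (x, y) == target:
--                     return distance
--
--                 for dx, dy in [(0, 1), (0, -1), (1, 0), (-1, 0)]:
--                     nx, ny = x + dx, y + dy
--                     if 0 <= nx < 4 and 0 <= ny < 3 and (nx, ny) not in visited:
--                         if dial[nx][ny] != -1:
--                             visited.add((nx, ny))
--                             queue.append((nx, ny))
--             distance += 1
--         return float('inf')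
--
--
--
--     for i in range(len(numbers)):
--         if numbers[i] in [1, 4, 7, '*']:
--             answer += "L"
--             left = dial_map[numbers[i]]
--         elif numbers[i] in [3, 6, 9, '#']:
--             answer += "R"
--             right = dial_map[numbers[i]]
--         else:
--             left_far = bfs(left, dial_map[numbers[i]])
--             right_far = bfs(right, dial_map[numbers[i]])
--
--             if left_far == right_far:
--                 if hand == "left":
--                     answer += "L"
--                     left = dial_map[numbers[i]]
--                 elif hand == "right":
--                     answer += "R"
--                     right = dial_map[numbers[i]]
--
--             elif left_far < right_far:
--                 answer += "L"
--                 left = dial_map[numbers[i]]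
--
--             else:
--                 answer += "R"
--                 right = dial_map[numbers[i]]
--
--     return answer
-- ===== SOURCE B (Python) =====
-- def solution(numbers, hand):
--     pos = {1: (0, 0), 2: (0, 1), 3: (0, 2),
--            4: (1, 0), 5: (1, 1), 6: (1, 2),
--            7: (2, 0), 8: (2, 1), 9: (2, 2),
--            0: (3, 1), '*': (3, 0), '#': (3, 2)}
--     left, right = pos['*'], pos['#']
--     out = []
--     for n in numbers:
--         if n in (1, 4, 7):
--             out.append("L")
--             left = pos[n]
--         elif n in (3, 6, 9):
--             out.append("R")
--             right = pos[n]
--         else: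
--             t = pos[n]
--             dl = abs(left[0] - t[0]) + abs(left[1] - t[1])
--             dr = abs(right[0] - t[0]) + abs(right[1] - t[1])
--             if dl < dr or (dl == dr and hand == "left"):
--                 out.append("L")
--                 left = t
--             elif dr < dl or hand == "right":
--                 out.append("R")
--                 right = t
--     return "".join(out)
-- ===== Notes on version B (the rewrite author's own statement) =====
-- stated objective: simpler
-- what changed: Replaced the per-key BFS distance search with a direct Manhattan-distance formula (valid because the keypad grid has no obstacles), and folded A's nested tie/hand branching into two flat conditions.
import Mathlib
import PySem

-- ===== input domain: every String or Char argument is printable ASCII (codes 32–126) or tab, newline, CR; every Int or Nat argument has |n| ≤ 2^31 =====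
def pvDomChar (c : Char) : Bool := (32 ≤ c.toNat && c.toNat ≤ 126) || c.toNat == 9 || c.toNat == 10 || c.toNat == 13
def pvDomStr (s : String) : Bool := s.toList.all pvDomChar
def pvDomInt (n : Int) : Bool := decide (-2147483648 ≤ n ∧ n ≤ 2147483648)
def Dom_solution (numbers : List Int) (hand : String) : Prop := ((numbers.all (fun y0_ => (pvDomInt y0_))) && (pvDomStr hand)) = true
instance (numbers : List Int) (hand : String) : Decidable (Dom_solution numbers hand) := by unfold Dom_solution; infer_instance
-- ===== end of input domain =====

-- B replaces A's per-key BFS by the closed-form Manhattan distance (the grid has no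
-- obstacles) and flattens the tie/hand branching; objective: simpler.

-- ===== PORT A =====

-- dial_map: keys 0..9 used in the loop (KeyError for other ints is excluded by Pre_;
-- the default (0,0) is never reached inside Pre_).
def dialMap (n : Int) : Int × Int :=
  if n = 1 then (0, 0) else if n = 2 then (0, 1) else if n = 3 then (0, 2)
  else if n = 4 then (1, 0) else if n = 5 then (1, 1) else if n = 6 then (1, 2)
  else if n = 7 then (2, 0) else if n = 8 then (2, 1) else if n = 9 then (2, 2)
  else if n = 0 then (3, 1) else (0, 0)

-- the grid entries of `dial` as strings ('*','#' kept as-is); the Python check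
-- `dial[nx][ny] != -1` is the check `≠ "-1"` here: true for every cell in both programs.
def dialCell (nx ny : Int) : String :=
  if nx = 0 then (if ny = 0 then "1" else if ny = 1 then "2" else "3")
  else if nx = 1 then (if ny = 0 then "4" else if ny = 1 then "5" else "6")
  else if nx = 2 then (if ny = 0 then "7" else if ny = 1 then "8" else "9")
  else (if ny = 0 then "*" else if ny = 1 then "0" else "#")

-- the inner `for dx, dy in [...]` neighbour expansion, in the same order
def bfsExpand (x y : Int) :
    List (Int × Int) → List (Int × Int) × PySem.Set (Int × Int) → List (Int × Int) × PySem.Set (Int × Int)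
  | [], st => st
  | (dx, dy) :: ds, (q, vis) =>
    let nx := x + dx
    let ny := y + dy
    if 0 ≤ nx ∧ nx < 4 ∧ 0 ≤ ny ∧ ny < 3 ∧ ¬ ((nx, ny) ∈ vis) then
      if dialCell nx ny ≠ "-1" then
        bfsExpand x y ds (q ++ [(nx, ny)], vis.add (nx, ny))
      else bfsExpand x y ds (q, vis)
    else bfsExpand x y ds (q, vis)

-- `for _ in range(len(queue))`: pop each element of the current layer in order;
-- `none` signals the early `return distance` when the target is popped.
def bfsLayer (target : Int × Int) :
    List (Int × Int) → List (Int × Int) → PySem.Set (Int × Int) →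
    Option (List (Int × Int) × PySem.Set (Int × Int))
  | [], nq, vis => some (nq, vis)
  | (x, y) :: rest, nq, vis =>
    if (x, y) = target then none
    else
      let st := bfsExpand x y [(0, 1), (0, -1), (1, 0), (-1, 0)] (nq, vis)
      bfsLayer target rest st.1 st.2

-- the `while queue:` loop; fuel 20 only makes the recursion total — the 12-cell grid is
-- exhausted long before that, so the fuel branch (like Python's `float('inf')` return,
-- here 1000) is unreachable for starts on the grid.
def bfsAux (target : Int × Int) : Nat → List (Int × Int) → PySem.Set (Int × Int) → Int → Int
  | 0, _, _, _ => 1000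
  | f + 1, queue, vis, dist =>
    if queue = [] then 1000
    else
      match bfsLayer target queue [] vis with
      | none => dist
      | some (nq, vis') => bfsAux target f nq vis' (dist + 1)

def bfs (start target : Int × Int) : Int :=
  bfsAux target 20 [start] (PySem.Set.ofList [start]) 0

-- the body of A's `for i in range(len(numbers))` loop
def stepA (hand : String) (st : String × (Int × Int) × (Int × Int)) (n : Int) :
    String × (Int × Int) × (Int × Int) :=
  let (answer, left, right) := st
  if n = 1 ∨ n = 4 ∨ n = 7 then (answer ++ "L", dialMap n, right)
  else if n = 3 ∨ n = 6 ∨ n = 9 then (answer ++ "R", left, dialMap n)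
  else
    let leftFar := bfs left (dialMap n)
    let rightFar := bfs right (dialMap n)
    if leftFar = rightFar then
      if hand = "left" then (answer ++ "L", dialMap n, right)
      else if hand = "right" then (answer ++ "R", left, dialMap n)
      else (answer, left, right)
    else if leftFar < rightFar then (answer ++ "L", dialMap n, right)
    else (answer ++ "R", left, dialMap n)

def loopA (hand : String) : List Int → String × (Int × Int) × (Int × Int) → String
  | [], (answer, _, _) => answer
  | n :: rest, st => loopA hand rest (stepA hand st n)

def solution (numbers : List Int) (hand : String) : String :=
  loopA hand numbers ("", (3, 0), (3, 2))

-- ===== PORT B =====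

def stepB (hand : String) (st : List String × (Int × Int) × (Int × Int)) (n : Int) :
    List String × (Int × Int) × (Int × Int) :=
  let (out, left, right) := st
  if n = 1 ∨ n = 4 ∨ n = 7 then (out ++ ["L"], dialMap n, right)
  else if n = 3 ∨ n = 6 ∨ n = 9 then (out ++ ["R"], left, dialMap n)
  else
    let t := dialMap n
    let dl := |left.1 - t.1| + |left.2 - t.2|
    let dr := |right.1 - t.1| + |right.2 - t.2|
    if dl < dr ∨ (dl = dr ∧ hand = "left") then (out ++ ["L"], t, right)
    else if dr < dl ∨ hand = "right" then (out ++ ["R"], left, t)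
    else (out, left, right)

def loopB (hand : String) : List Int → List String × (Int × Int) × (Int × Int) → List String
  | [], (out, _, _) => out
  | n :: rest, st => loopB hand rest (stepB hand st n)

def solution_alt (numbers : List Int) (hand : String) : String :=
  String.join (loopB hand numbers ([], (3, 0), (3, 2)))

-- ===== PRECONDITION & SPEC =====
-- Pre_ excludes lists containing an int outside 0..9: there A's dial_map lookup raises KeyError.
def Pre_solution (numbers : List Int) (hand : String) : Prop :=
  ∀ n ∈ numbers, 0 ≤ n ∧ n ≤ 9
instance (numbers : List Int) (hand : String) : Decidable (Pre_solution numbers hand) := by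
  unfold Pre_solution; infer_instance
def pvWitness_solution : List Int × String := ([1, 3, 4, 5, 8, 2, 1, 4, 5, 9, 5], "right")

def Spec_solution (numbers : List Int) (hand : String) (out : String) : Prop := out = solution_alt numbers hand
instance (numbers : List Int) (hand : String) (out : String) : Decidable (Spec_solution numbers hand out) := by unfold Spec_solution; infer_instance

-- ===== CLAIM (what is proved, stated in full; the proofs are below) =====
def Claim_equal_solution : Prop := ∀ (numbers : List Int) (hand : String), Dom_solution numbers hand → Pre_solution numbers hand → Spec_solution numbers hand (solution numbers hand)

-- ===== LEMMAS AND PROOFS =====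

-- the 12 keypad cells; left/right always stay in this set
def Cells : List (Int × Int) :=
  [(0,0),(0,1),(0,2),(1,0),(1,1),(1,2),(2,0),(2,1),(2,2),(3,0),(3,1),(3,2)]

theorem dialMap_mem_cells (n : Int) (h0 : 0 ≤ n) (h9 : n ≤ 9) : dialMap n ∈ Cells := by
  interval_cases n <;> decide

-- BFS on the obstacle-free grid computes exactly the Manhattan distance,
-- for any start cell and any target cell reached through the else-branch (n ∈ {0,2,5,8})
theorem bfs_eq_manhattan :
    ∀ l ∈ Cells, ∀ t ∈ [(3,1),(0,1),(1,1),(2,1)],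
      bfs l t = |l.1 - t.1| + |l.2 - t.2| := by decide

theorem step_eq (hand : String) (n : Int) (h0 : 0 ≤ n) (h9 : n ≤ 9)
    (l r : Int × Int) (hl : l ∈ Cells) (hr : r ∈ Cells) (ans : String) (out : List String)
    (hst : ans = String.join out) :
    (stepA hand (ans, l, r) n).1 = String.join (stepB hand (out, l, r) n).1 ∧
    (stepA hand (ans, l, r) n).2 = (stepB hand (out, l, r) n).2 := by
  subst hst
  unfold stepA stepB
  by_cases h147 : n = 1 ∨ n = 4 ∨ n = 7
  · simp [h147, String.join]
  by_cases h369 : n = 3 ∨ n = 6 ∨ n = 9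
  · simp [h147, h369, String.join]
  · have ht : dialMap n ∈ [((3:Int),(1:Int)),(0,1),(1,1),(2,1)] := by
      interval_cases n <;> simp_all <;> decide
    have hbl := bfs_eq_manhattan l hl (dialMap n) ht
    have hbr := bfs_eq_manhattan r hr (dialMap n) ht
    simp only [h147, h369, if_false, hbl, hbr]
    set dl := |l.1 - (dialMap n).1| + |l.2 - (dialMap n).2| with hdl
    set dr := |r.1 - (dialMap n).1| + |r.2 - (dialMap n).2| with hdr
    rcases lt_trichotomy dl dr with hlt | heq | hgt
    · simp [hlt, ne_of_lt hlt, String.join]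
    · by_cases hL : hand = "left"
      · simp [heq, hL, String.join]
      · by_cases hR : hand = "right" <;> simp [heq, hL, hR, String.join]
    · have hne : ¬ dl = dr := ne_of_gt hgt
      have hnlt : ¬ dl < dr := not_lt_of_gt hgt
      simp [hne, hnlt, hgt, String.join]

theorem step_pos_mem (hand : String) (n : Int) (h0 : 0 ≤ n) (h9 : n ≤ 9)
    (l r : Int × Int) (hl : l ∈ Cells) (hr : r ∈ Cells) (out : List String) :
    (stepB hand (out, l, r) n).2.1 ∈ Cells ∧ (stepB hand (out, l, r) n).2.2 ∈ Cells := by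
  have hd := dialMap_mem_cells n h0 h9
  unfold stepB
  by_cases h1 : n = 1 ∨ n = 4 ∨ n = 7
  · simp [h1, hd, hr]
  by_cases h2 : n = 3 ∨ n = 6 ∨ n = 9
  · simp [h1, h2, hd, hl]
  · simp only [h1, h2, if_false]
    split_ifs <;> simp_all

theorem loop_eq (hand : String) :
    ∀ (numbers : List Int), (∀ n ∈ numbers, 0 ≤ n ∧ n ≤ 9) →
    ∀ (l r : Int × Int), l ∈ Cells → r ∈ Cells →
    ∀ (ans : String) (out : List String), ans = String.join out →
    loopA hand numbers (ans, l, r) = String.join (loopB hand numbers (out, l, r)) := by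
  intro numbers
  induction numbers with
  | nil => intro _ l r _ _ ans out h; simpa [loopA, loopB]
  | cons n rest ih =>
    intro hpre l r hl hr ans out hst
    have hn := hpre n (by simp)
    have hs := step_eq hand n hn.1 hn.2 l r hl hr ans out hst
    have hm := step_pos_mem hand n hn.1 hn.2 l r hl hr out
    simp only [loopA, loopB]
    rcases hA : stepA hand (ans, l, r) n with ⟨a1, p1⟩
    rcases hB : stepB hand (out, l, r) n with ⟨o1, q1⟩
    have h1 : a1 = String.join o1 := by rw [hA, hB] at hs; simpa using hs.1
    have h2 : p1 = q1 := by rw [hA, hB] at hs; simpa using hs.2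
    rw [hB] at hm
    rcases q1 with ⟨ql, qr⟩
    subst h2
    exact ih (fun m hm' => hpre m (by simp [hm'])) ql qr hm.1 hm.2 a1 o1 h1

-- ===== VERDICT (by name: the statement is the Claim_ definition above) =====
theorem solution_spec : Claim_equal_solution := by
  intro numbers hand _ hpre
  unfold Spec_solution solution solution_alt
  exact loop_eq hand numbers hpre (3, 0) (3, 2) (by decide) (by decide) "" [] rfl
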